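-- pv_equiv track=rewrite | github.com/tanaypatil/code-blooded-ninjas | dynamic_programming_1/angry_children.py | get_min_unfairness
-- ===== SOURCE A (Python) =====
-- def get_min_unfairness(arr, k):
--     target = 0
--     s = arr[0]
--     for i in range(1, k):
--         target += i*arr[i] - s
--         s += arr[i]
--     min_unfairness = target
--     for i in range(k, len(arr)):
--         unfairness = target - 2*(s-arr[i-k]) + (k-1)*(arr[i-k]+arr[i])
--         if unfairness < min_unfairness:
--             min_unfairness = unfairness
--         s = s-arr[i-k]+arr[i]
--         target = unfairness
--     return min_unfairness
-- ===== SOURCE B (Python) =====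
-- def get_min_unfairness(arr, k):
--     def wsum(j):
--         return sum((2 * i - (k - 1)) * arr[j + i] for i in range(k))
--     best = wsum(0)
--     for j in range(1, len(arr) - k + 1):
--         cur = wsum(j)
--         if cur < best:
--             best = cur
--     return best
-- ===== Notes on version B (the rewrite author's own statement) =====
-- stated objective: alternative
-- what changed: B recomputes each window's unfairness from scratch as the closed-form weighted sum sum_i (2*i-(k-1))*arr[j+i] and takes the minimum over window starts, instead of A's O(n) sliding-window recurrence maintaining running totals s and target.
-- outside the precondition, e.g. on get_min_unfairness([3, 1], 0): A returns -12, B returns 0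
import Mathlib
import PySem

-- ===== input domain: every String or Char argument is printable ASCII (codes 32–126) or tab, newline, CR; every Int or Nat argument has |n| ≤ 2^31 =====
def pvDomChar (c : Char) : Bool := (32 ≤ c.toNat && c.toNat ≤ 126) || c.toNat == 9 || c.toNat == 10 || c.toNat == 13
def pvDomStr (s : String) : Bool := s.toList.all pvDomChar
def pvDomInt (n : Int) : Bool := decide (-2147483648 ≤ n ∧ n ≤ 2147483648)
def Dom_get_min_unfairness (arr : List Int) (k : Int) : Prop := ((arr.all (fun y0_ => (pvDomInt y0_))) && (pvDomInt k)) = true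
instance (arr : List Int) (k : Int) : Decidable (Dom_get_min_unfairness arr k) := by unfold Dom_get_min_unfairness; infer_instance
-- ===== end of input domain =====

-- B recomputes each window's unfairness from the closed-form weighted sum instead of A's
-- sliding recurrence; objective: alternative (not claimed faster).

-- arr[t]: total in-range form of Python indexing; exact under Pre_ (indices are in range there)
def pyAt (arr : List Int) (t : Int) : Int := (PySem.List.pyGet? arr t).getD 0

-- ===== PORT A =====
def get_min_unfairness (arr : List Int) (k : Int) : Int :=
  -- target = 0; s = arr[0]; for i in range(1, k): target += i*arr[i] - s; s += arr[i]
  let ts := (PySem.List.pyRange 1 k 1).foldl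
    (fun (ts : Int × Int) i => (ts.1 + i * pyAt arr i - ts.2, ts.2 + pyAt arr i))
    (0, pyAt arr 0)
  -- min_unfairness = target; for i in range(k, len(arr)): …
  let st := (PySem.List.pyRange k (arr.length : Int) 1).foldl
    (fun (st : Int × Int × Int) i =>
      let unf := st.2.1 - 2 * (st.2.2 - pyAt arr (i - k)) + (k - 1) * (pyAt arr (i - k) + pyAt arr i)
      (if unf < st.1 then unf else st.1, unf, st.2.2 - pyAt arr (i - k) + pyAt arr i))
    (ts.1, ts.1, ts.2)
  st.1

-- ===== PORT B =====
-- wsum(j) = sum((2*i - (k-1)) * arr[j+i] for i in range(k))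
def pvWsum (arr : List Int) (k : Int) (j : Int) : Int :=
  (PySem.List.pyRange 0 k 1).foldl
    (fun acc i => acc + (2 * i - (k - 1)) * pyAt arr (j + i)) 0

def get_min_unfairness_alt (arr : List Int) (k : Int) : Int :=
  (PySem.List.pyRange 1 ((arr.length : Int) - k + 1) 1).foldl
    (fun best j => let cur := pvWsum arr k j; if cur < best then cur else best)
    (pvWsum arr k 0)

-- ===== PRECONDITION & SPEC =====
-- Pre_ excludes: empty arr / k > len(arr) / k < 0, where A raises IndexError; and k = 0, where
-- A still returns a value built from leftover loop state (e.g. -12 on ([3,1],0)) — an accident of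
-- A's degenerate-k path outside the task's natural domain 1 ≤ k ≤ len(arr); B returns 0 there.
def Pre_get_min_unfairness (arr : List Int) (k : Int) : Prop :=
  1 ≤ k ∧ k ≤ (arr.length : Int)
instance (arr : List Int) (k : Int) : Decidable (Pre_get_min_unfairness arr k) := by
  unfold Pre_get_min_unfairness; infer_instance

def pvWitness_get_min_unfairness : List Int × Int := ([1, 3, 9, 2], 2)

def Spec_get_min_unfairness (arr : List Int) (k : Int) (out : Int) : Prop := out = get_min_unfairness_alt arr k
instance (arr : List Int) (k : Int) (out : Int) : Decidable (Spec_get_min_unfairness arr k out) := by unfold Spec_get_min_unfairness; infer_instance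

-- ===== CLAIM (what is proved, stated in full; the proofs are below) =====
def Claim_equal_get_min_unfairness : Prop := ∀ (arr : List Int) (k : Int), Dom_get_min_unfairness arr k → Pre_get_min_unfairness arr k → Spec_get_min_unfairness arr k (get_min_unfairness arr k)

-- ===== LEMMAS AND PROOFS =====
-- Mathematical views of the window sums, over an arbitrary total index function f.
def pvS (f : Int → Int) (m : Nat) (j : Int) : Int :=
  ((List.range m).map (fun i : Nat => f (j + (i : Int)))).sum
def pvV (f : Int → Int) (m : Nat) (j : Int) : Int :=
  ((List.range m).map (fun i : Nat => 2 * (i : Int) * f (j + (i : Int)))).sum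
def pvW (f : Int → Int) (m : Nat) (j : Int) : Int :=
  ((List.range m).map (fun i : Nat => (2 * (i : Int) - ((m : Int) - 1)) * f (j + (i : Int)))).sum

theorem pvS_succ (f : Int → Int) (m : Nat) (j : Int) :
    pvS f (m + 1) j = pvS f m j + f (j + (m : Int)) := by
  simp [pvS, List.range_succ]

theorem pvV_succ (f : Int → Int) (m : Nat) (j : Int) :
    pvV f (m + 1) j = pvV f m j + 2 * (m : Int) * f (j + (m : Int)) := by
  simp [pvV, List.range_succ]

theorem pvSubMul (f : Int → Int) (j c : Int) (l : List Nat) :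
    (l.map (fun i : Nat => (2 * (i : Int) - c) * f (j + (i : Int)))).sum
    = (l.map (fun i : Nat => 2 * (i : Int) * f (j + (i : Int)))).sum
      - c * (l.map (fun i : Nat => f (j + (i : Int)))).sum := by
  induction l with
  | nil => simp
  | cons x l ih => simp only [List.map_cons, List.sum_cons, ih]; ring

theorem pvW_decomp (f : Int → Int) (m : Nat) (j : Int) :
    pvW f m j = pvV f m j - ((m : Int) - 1) * pvS f m j := by
  simpa only [pvW, pvV, pvS] using pvSubMul f j ((m : Int) - 1) (List.range m)

theorem pvS_shift (f : Int → Int) (m : Nat) (j : Int) :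
    pvS f m (j + 1) = pvS f m j - f j + f (j + (m : Int)) := by
  induction m with
  | zero => simp [pvS]
  | succ m ih =>
    rw [pvS_succ, pvS_succ, ih]
    have e1 : j + 1 + (m : Int) = j + ((m : Int) + 1) := by ring
    have e2 : ((m + 1 : Nat) : Int) = (m : Int) + 1 := by push_cast; ring
    rw [e1, e2]; ring

theorem pvV_shift (f : Int → Int) (m : Nat) (j : Int) :
    pvV f m (j + 1) = pvV f m j - 2 * pvS f m j + (2 * (m : Int) - 2) * f (j + (m : Int)) + 2 * f j := by
  induction m with
  | zero => simp [pvV, pvS]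
  | succ m ih =>
    rw [pvV_succ, pvV_succ, pvS_succ, ih]
    have e1 : j + 1 + (m : Int) = j + ((m : Int) + 1) := by ring
    have e2 : ((m + 1 : Nat) : Int) = (m : Int) + 1 := by push_cast; ring
    rw [e1, e2]; ring

theorem pvW_shift (f : Int → Int) (m : Nat) (j : Int) :
    pvW f m (j + 1) = pvW f m j - 2 * (pvS f m j - f j) + ((m : Int) - 1) * (f j + f (j + (m : Int))) := by
  rw [pvW_decomp, pvW_decomp, pvV_shift, pvS_shift]; ring

theorem pvW_succ (f : Int → Int) (m : Nat) :
    pvW f (m + 1) 0 = pvW f m 0 + (m : Int) * f (m : Int) - pvS f m 0 := by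
  have e2 : ((m + 1 : Nat) : Int) = (m : Int) + 1 := by push_cast; ring
  rw [pvW_decomp, pvW_decomp, pvV_succ, pvS_succ, e2]
  have e0 : (0 : Int) + (m : Int) = (m : Int) := by ring
  rw [e0]; ring

-- first loop of A: (target, s) after range(1, m+1) is the weighted sum / plain sum of window 0
theorem pvFirstLoop (f : Int → Int) (m : Nat) :
    (PySem.List.pyRange 1 ((m : Int) + 1) 1).foldl
      (fun (ts : Int × Int) i => (ts.1 + i * f i - ts.2, ts.2 + f i)) (0, f 0)
    = (pvW f (m + 1) 0, pvS f (m + 1) 0) := by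
  induction m with
  | zero =>
    have h : PySem.List.pyRange 1 ((0 : Nat) + 1 : Int) 1 = [] := by decide
    rw [h]
    simp [pvW, pvS, List.foldl]
  | succ m ih =>
    have e2 : (((m + 1 : Nat)) : Int) + 1 = ((m : Int) + 1) + 1 := by push_cast; ring
    rw [e2, PySem.List.pyRange_one_succ_right (by omega), List.foldl_append, ih]
    simp only [List.foldl_cons, List.foldl_nil]
    have e3 : ((m + 1 : Nat) : Int) = (m : Int) + 1 := by push_cast; ring
    rw [pvW_succ f (m + 1), pvS_succ f (m + 1), e3]
    have e0 : (0 : Int) + ((m : Int) + 1) = (m : Int) + 1 := by ring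
    rw [e0]

-- second loop of A: after range(k, k+c) the state is the running min / window sums at window c
theorem pvSecondLoop (f : Int → Int) (kn : Nat) (c : Nat) (mv : Int) :
    (PySem.List.pyRange (kn : Int) ((kn : Int) + (c : Int)) 1).foldl
      (fun (st : Int × Int × Int) i =>
        let unf := st.2.1 - 2 * (st.2.2 - f (i - (kn : Int))) + ((kn : Int) - 1) * (f (i - (kn : Int)) + f i)
        (if unf < st.1 then unf else st.1, unf, st.2.2 - f (i - (kn : Int)) + f i))
      (mv, pvW f kn 0, pvS f kn 0)
    = ((List.range c).foldl
        (fun b (t : Nat) => if pvW f kn ((t : Int) + 1) < b then pvW f kn ((t : Int) + 1) else b) mv,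
       pvW f kn (c : Int), pvS f kn (c : Int)) := by
  induction c with
  | zero =>
    have e : (kn : Int) + ((0 : Nat) : Int) = (kn : Int) := by simp
    rw [e]
    have h : PySem.List.pyRange (kn : Int) (kn : Int) 1 = [] := by
      simp [PySem.List.pyRange]
    rw [h]
    simp
  | succ c ih =>
    have e2 : (kn : Int) + ((c + 1 : Nat) : Int) = ((kn : Int) + (c : Int)) + 1 := by push_cast; ring
    rw [e2, PySem.List.pyRange_one_succ_right (by omega), List.foldl_append, ih]
    simp only [List.foldl_cons, List.foldl_nil]
    have eik : (kn : Int) + (c : Int) - (kn : Int) = (c : Int) := by ring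
    have eck : (c : Int) + (kn : Int) = (kn : Int) + (c : Int) := by ring
    have hu : pvW f kn ((c : Int) + 1)
        = pvW f kn (c : Int) - 2 * (pvS f kn (c : Int) - f (c : Int))
          + ((kn : Int) - 1) * (f (c : Int) + f ((kn : Int) + (c : Int))) := by
      rw [pvW_shift, eck]
    have hs : pvS f kn ((c : Int) + 1)
        = pvS f kn (c : Int) - f (c : Int) + f ((kn : Int) + (c : Int)) := by
      rw [pvS_shift, eck]
    have e3 : ((c + 1 : Nat) : Int) = (c : Int) + 1 := by push_cast; ring
    rw [List.range_succ, List.foldl_append]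
    simp only [List.foldl_cons, List.foldl_nil, eik, e3]
    rw [← hu, hs]

-- B's min-loop over pyRange 1 (c+1) is the same min-fold over List.range c
theorem pvRangeBridge (g : Int → Int) (c : Nat) (mv : Int) :
    (PySem.List.pyRange 1 ((c : Int) + 1) 1).foldl
      (fun b j => if g j < b then g j else b) mv
    = (List.range c).foldl
        (fun b (t : Nat) => if g ((t : Int) + 1) < b then g ((t : Int) + 1) else b) mv := by
  induction c with
  | zero =>
    have h : PySem.List.pyRange 1 (((0 : Nat) : Int) + 1) 1 = [] := by decide
    rw [h]; simp
  | succ c ih =>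
    have e2 : ((c + 1 : Nat) : Int) + 1 = ((c : Int) + 1) + 1 := by push_cast; ring
    rw [e2, PySem.List.pyRange_one_succ_right (by omega), List.foldl_append, ih,
      List.range_succ, List.foldl_append]
    simp only [List.foldl_cons, List.foldl_nil]

theorem pvWsum_eq (arr : List Int) (kn : Nat) (j : Int) :
    pvWsum arr (kn : Int) j = pvW (pyAt arr) kn j := by
  unfold pvWsum pvW
  rw [PySem.List.pyRange_zero_natCast, List.foldl_map,
    PySem.List.foldl_add (List.range kn)
      (fun i : Nat => (2 * (i : Int) - ((kn : Int) - 1)) * pyAt arr (j + (i : Int))) 0]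
  exact zero_add _

-- ===== VERDICT (by name: the statement is the Claim_ definition above) =====
theorem get_min_unfairness_spec : Claim_equal_get_min_unfairness := by
  intro arr k hDom hPre
  obtain ⟨hk1, hk2⟩ := hPre
  obtain ⟨kn, rfl⟩ : ∃ kn : Nat, k = (kn : Int) := ⟨k.toNat, (Int.toNat_of_nonneg (by omega)).symm⟩
  have hkn1 : 1 ≤ kn := by exact_mod_cast hk1
  have hkn2 : kn ≤ arr.length := by exact_mod_cast hk2
  obtain ⟨m, rfl⟩ : ∃ m : Nat, kn = m + 1 := ⟨kn - 1, by omega⟩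
  unfold Spec_get_min_unfairness get_min_unfairness get_min_unfairness_alt
  have eb1 : ((m + 1 : Nat) : Int) = (m : Int) + 1 := by push_cast; ring
  have eb2 : (arr.length : Int) = ((m + 1 : Nat) : Int) + ((arr.length - (m + 1) : Nat) : Int) := by
    push_cast; omega
  have eb3 : ((m + 1 : Nat) : Int) + ((arr.length - (m + 1) : Nat) : Int) - ((m + 1 : Nat) : Int) + 1
      = (((arr.length - (m + 1) : Nat)) : Int) + 1 := by push_cast; ring
  have hA1 : (PySem.List.pyRange 1 ((m + 1 : Nat) : Int) 1).foldl
      (fun (ts : Int × Int) i => (ts.1 + i * pyAt arr i - ts.2, ts.2 + pyAt arr i)) (0, pyAt arr 0)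
      = (pvW (pyAt arr) (m + 1) 0, pvS (pyAt arr) (m + 1) 0) := by
    rw [eb1]; exact pvFirstLoop (pyAt arr) m
  rw [hA1]
  dsimp only
  rw [eb2, pvSecondLoop (pyAt arr) (m + 1) (arr.length - (m + 1)) (pvW (pyAt arr) (m + 1) 0)]
  dsimp only
  have hfun : (fun (best j : Int) =>
        let cur := pvWsum arr ((m + 1 : Nat) : Int) j
        if cur < best then cur else best)
      = (fun (best j : Int) =>
        if pvW (pyAt arr) (m + 1) j < best then pvW (pyAt arr) (m + 1) j else best) := by
    funext b j; simp only [pvWsum_eq]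
  rw [eb3, hfun, pvWsum_eq, pvRangeBridge (pvW (pyAt arr) (m + 1)) (arr.length - (m + 1))]
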